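-- pv_equiv track=rewrite | github.com/wvphfk6yk5-ai/AtCoder | ABC/437/C.py | count
-- ===== SOURCE A (Python) =====
-- def count(n,grid):
--   w=sum(y for y,x in grid)
--   p=0
--   x = sorted(range(n), key=lambda i : (grid [i][1] + grid[i][0])*-1)
--   cnt=n
--
--   for i in x:
--
--     p += grid[i][1]
--     w -= grid[i][0]
--     cnt-=1
--
--     if p >= w:
--       break
--
--   if w == 0:
--     cnt = 0
--
--   return cnt
-- ===== SOURCE B (Python) =====
-- def count(n, grid):
--     total_y = sum(y for y, _ in grid)
--     pool = list(grid[:n]) if n > 0 else []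
--     got = 0
--     got_y = 0
--     picks = 0
--     while pool:
--         best = max(pool, key=lambda t: t[0] + t[1])
--         pool.remove(best)
--         y, x = best
--         got += x + y
--         got_y += y
--         picks += 1
--         if got >= total_y:
--             break
--     rem = total_y - got_y
--     return 0 if rem == 0 else n - picks
-- ===== Notes on version B (the rewrite author's own statement) =====
-- stated objective: alternative
-- what changed: A sorts the index list by descending x+y and walks the sorted prefix with a break; B never sorts: it repeatedly extracts the current maximum-(x+y) element from a shrinking pool (selection), stopping once the taken x+y sum reaches the total y.
import Mathlib
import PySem

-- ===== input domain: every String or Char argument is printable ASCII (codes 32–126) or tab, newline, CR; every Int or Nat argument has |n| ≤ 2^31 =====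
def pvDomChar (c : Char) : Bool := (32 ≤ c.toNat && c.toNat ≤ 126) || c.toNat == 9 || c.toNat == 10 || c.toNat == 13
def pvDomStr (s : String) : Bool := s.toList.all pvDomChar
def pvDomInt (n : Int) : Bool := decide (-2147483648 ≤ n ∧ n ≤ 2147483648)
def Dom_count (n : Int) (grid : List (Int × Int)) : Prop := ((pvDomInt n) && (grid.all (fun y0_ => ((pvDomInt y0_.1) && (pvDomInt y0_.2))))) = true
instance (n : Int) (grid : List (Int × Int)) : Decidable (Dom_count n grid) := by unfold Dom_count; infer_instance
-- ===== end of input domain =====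

-- B replaces A's sort-then-walk (sort indices by descending x+y, break on the prefix) by a
-- sort-free selection loop: repeatedly extract the current maximum-(x+y) element from a
-- shrinking pool until the taken x+y sum reaches the total y (objective: alternative algorithm).

-- used by the B port's termination argument (cited in decreasing_by)
theorem pvEraseLt {l : List (Int × Int)} {a : Int × Int} (h : a ∈ l) :
    (l.erase a).length < l.length := by
  have h1 := List.length_erase_of_mem h
  have h2 : 0 < l.length := List.length_pos_of_mem h
  omega

-- ===== PORT A =====
-- the for-loop with break: state (p, w, cnt), returns final (w, cnt)
def countLoopA (grid : List (Int × Int)) : List Int → Int → Int → Int → Int × Int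
  | [], _p, w, cnt => (w, cnt)
  | i :: rest, p, w, cnt =>
    -- grid[i]; always in range under Pre_count (0 ≤ i < n ≤ grid.length)
    let g := PySem.List.pyGetD grid i ((0 : Int), (0 : Int))
    let p' := p + g.2
    let w' := w - g.1
    let cnt' := cnt - 1
    if p' ≥ w' then (w', cnt') else countLoopA grid rest p' w' cnt'

def count (n : Int) (grid : List (Int × Int)) : Int :=
  let w := (grid.map Prod.fst).sum
  let p : Int := 0
  let x := PySem.List.sorted (PySem.List.pyRange 0 n 1)
      (fun i => ((PySem.List.pyGetD grid i ((0 : Int), (0 : Int))).2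
               + (PySem.List.pyGetD grid i ((0 : Int), (0 : Int))).1) * (-1))
  let cnt := n
  let r := countLoopA grid x p w cnt
  if r.1 = 0 then 0 else r.2

-- ===== PORT B =====
-- the while-pool loop: pick max(pool, key=x+y), remove it, accumulate; returns (picks, got_y)
def countLoopB (total : Int) (pool : List (Int × Int)) (got got_y picks : Int) : Int × Int :=
  match h : PySem.List.max? pool (fun t => t.1 + t.2) with
  | none => (picks, got_y)                               -- while pool: — pool exhausted
  | some m =>
    -- pool.remove(best): best ∈ pool, so remove? is always some (getD only makes it total)
    let pool' := (PySem.List.remove? pool m).getD []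
    let got' := got + m.2 + m.1
    let got_y' := got_y + m.1
    let picks' := picks + 1
    if got' ≥ total then (picks', got_y')               -- break
    else countLoopB total pool' got' got_y' picks'
  termination_by pool.length
  decreasing_by
    simp only [PySem.List.remove?_eq_some_erase pool m (PySem.List.max?_mem h), Option.getD_some]
    exact pvEraseLt (PySem.List.max?_mem h)

def count_alt (n : Int) (grid : List (Int × Int)) : Int :=
  let total_y := (grid.map Prod.fst).sum
  let pool := if n > 0 then PySem.List.slice grid none (some n) else []
  let r := countLoopB total_y pool 0 0 0
  let rem := total_y - r.2
  if rem = 0 then 0 else n - r.1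

-- ===== PRECONDITION & SPEC =====
-- Pre_ excludes exactly n > len(grid), where A raises IndexError on grid[i]
def Pre_count (n : Int) (grid : List (Int × Int)) : Prop := n ≤ (grid.length : Int)
instance (n : Int) (grid : List (Int × Int)) : Decidable (Pre_count n grid) := by
  unfold Pre_count; infer_instance

def pvWitness_count : Int × (List (Int × Int)) := (2, [(1, 2), (3, 0)])

def Spec_count (n : Int) (grid : List (Int × Int)) (out : Int) : Prop := out = count_alt n grid
instance (n : Int) (grid : List (Int × Int)) (out : Int) : Decidable (Spec_count n grid out) := by
  unfold Spec_count; infer_instance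

-- ===== CLAIM (what is proved, stated in full; the proofs are below) =====
def Claim_equal_count : Prop := ∀ (n : Int) (grid : List (Int × Int)),
  Dom_count n grid → Pre_count n grid → Spec_count n grid (count n grid)

-- ===== LEMMAS AND PROOFS =====

-- proof-only: A's loop on values instead of indices
def countLoopV : List (Int × Int) → Int → Int → Int → Int × Int
  | [], _p, w, cnt => (w, cnt)
  | t :: rest, p, w, cnt =>
    let p' := p + t.2
    let w' := w - t.1
    let cnt' := cnt - 1
    if p' ≥ w' then (w', cnt') else countLoopV rest p' w' cnt'

theorem loopA_eq_loopV (grid : List (Int × Int)) :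
    ∀ (xs : List Int) (p w cnt : Int),
    countLoopA grid xs p w cnt
      = countLoopV (xs.map (fun i => PySem.List.pyGetD grid i ((0:Int),(0:Int)))) p w cnt := by
  intro xs
  induction xs with
  | nil => intro p w cnt; rfl
  | cons i rest ih =>
    intro p w cnt
    simp only [countLoopA, countLoopV, List.map_cons]
    split <;> simp [ih]

theorem map_insertBy {α β : Type} (g : α → β) (bef : β → β → Bool) (x : α) :
    ∀ ys : List α,
    (PySem.List.insertBy (fun a b => bef (g a) (g b)) x ys).map g
      = PySem.List.insertBy bef (g x) (ys.map g) := by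
  intro ys
  induction ys with
  | nil => rfl
  | cons y t ih =>
    simp only [PySem.List.insertBy, List.map_cons]
    split <;> simp_all

theorem map_foldl_insertBy {α β : Type} (g : α → β) (bef : β → β → Bool) :
    ∀ (xs : List α) (acc : List α),
    (xs.foldl (fun a x => PySem.List.insertBy (fun u v => bef (g u) (g v)) x a) acc).map g
      = (xs.map g).foldl (fun a x => PySem.List.insertBy bef x a) (acc.map g) := by
  intro xs
  induction xs with
  | nil => intro acc; rfl
  | cons x t ih =>
    intro acc
    simp only [List.foldl_cons, List.map_cons]
    rw [ih, map_insertBy]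

theorem map_sorted {α β : Type} (g : α → β) (h : β → Int) (xs : List α) :
    (PySem.List.sorted xs (fun a => h (g a)) false).map g
      = PySem.List.sorted (xs.map g) h false := by
  show (xs.foldl (fun a x => PySem.List.insertBy (fun u v => decide (h (g u) < h (g v))) x a) []).map g = _
  rw [map_foldl_insertBy g (fun u v => decide (h u < h v))]
  rfl

theorem map_getD_range {α : Type} (xs : List α) (d : α) :
    ∀ m : Nat, m ≤ xs.length → (List.range m).map (fun k => xs.getD k d) = xs.take m := by
  intro m
  induction m with
  | zero => intro _; simp
  | succ m ih =>
    intro hm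
    rw [List.range_succ, List.map_append, ih (by omega), List.take_add_one]
    simp [List.getD, Nat.lt_of_succ_le hm]

-- A's key on indices equals B's key composed with the lookup
theorem key_eq (grid : List (Int × Int)) :
    (fun i => ((PySem.List.pyGetD grid i ((0:Int),(0:Int))).2
             + (PySem.List.pyGetD grid i ((0:Int),(0:Int))).1) * (-1))
      = (fun i => -(((PySem.List.pyGetD grid i ((0:Int),(0:Int))).1)
                  + ((PySem.List.pyGetD grid i ((0:Int),(0:Int))).2))) := by
  funext i; ring

theorem map_pyRange_eq_pool (grid : List (Int × Int)) (n : Int)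
    (hn : n ≤ (grid.length : Int)) :
    (PySem.List.pyRange 0 n 1).map (fun i => PySem.List.pyGetD grid i ((0:Int),(0:Int)))
      = (if n > 0 then PySem.List.slice grid none (some n) else []) := by
  by_cases h0 : n > 0
  · rw [if_pos h0]
    rw [PySem.List.slice_to grid (by omega)]
    rw [PySem.List.pyRange_one 0 n]
    simp only [List.map_map]
    have : ((fun i => PySem.List.pyGetD grid i ((0:Int),(0:Int))) ∘ (fun k : Nat => (0:Int) + (k:Int)))
        = fun k : Nat => grid.getD k ((0:Int),(0:Int)) := by
      funext k
      simp [PySem.List.pyGetD_natCast]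
    rw [show n - 0 = n by ring, this, map_getD_range grid ((0:Int),(0:Int)) n.toNat (by omega)]
  · rw [if_neg h0, PySem.List.pyRange_one_eq_nil (by omega)]
    rfl

-- the x+y key of B, and the sort key -(x+y) of A
def pvK (t : Int × Int) : Int := t.1 + t.2

-- first-max split: max? xs returns the FIRST element attaining the maximum key
theorem max?_cons_cons (a x : Int × Int) (t : List (Int × Int)) :
    PySem.List.max? (a :: x :: t) (fun t => t.1 + t.2)
      = PySem.List.max? ((if a.1 + a.2 < x.1 + x.2 then x else a) :: t) (fun t => t.1 + t.2) := by
  by_cases h : a.1 + a.2 < x.1 + x.2 <;>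
    simp only [PySem.List.max?, List.foldl_cons] <;> congr 1 <;> simp [h]

theorem max?_cons_eq_foldl (a : Int × Int) (t : List (Int × Int)) :
    PySem.List.max? (a :: t) (fun t => t.1 + t.2)
      = some (t.foldl (fun acc x => if acc.1 + acc.2 < x.1 + x.2 then x else acc) a) := by
  induction t generalizing a with
  | nil => rfl
  | cons x t' ih => rw [max?_cons_cons, ih, List.foldl_cons]

theorem maxFold_spec :
    ∀ (t : List (Int × Int)) (a m : Int × Int),
    t.foldl (fun acc x => if acc.1 + acc.2 < x.1 + x.2 then x else acc) a = m →
    (m = a ∧ ∀ y ∈ t, pvK y ≤ pvK a)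
    ∨ (∃ pre suf, t = pre ++ m :: suf ∧ pvK a < pvK m
        ∧ (∀ y ∈ pre, pvK y < pvK m) ∧ (∀ y ∈ suf, pvK y ≤ pvK m)) := by
  intro t
  induction t with
  | nil => intro a m hm; left; exact ⟨hm.symm, by simp⟩
  | cons x t' ih =>
    intro a m hm
    rw [List.foldl_cons] at hm
    by_cases hx : a.1 + a.2 < x.1 + x.2
    · rw [if_pos hx] at hm
      rcases ih x m hm with ⟨rfl, hall⟩ | ⟨pre, suf, ht, hlt, hpre, hsuf⟩
      · right
        exact ⟨[], t', rfl, hx, by simp, hall⟩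
      · right
        refine ⟨x :: pre, suf, by simp [ht], ?_, ?_, hsuf⟩
        · unfold pvK at *; omega
        · intro y hy
          rcases List.mem_cons.mp hy with rfl | hy
          · exact hlt
          · exact hpre y hy
    · rw [if_neg hx] at hm
      rcases ih a m hm with ⟨rfl, hall⟩ | ⟨pre, suf, ht, hlt, hpre, hsuf⟩
      · left
        refine ⟨rfl, ?_⟩
        intro y hy
        rcases List.mem_cons.mp hy with rfl | hy
        · unfold pvK at *; omega
        · exact hall y hy
      · right
        refine ⟨x :: pre, suf, by simp [ht], hlt, ?_, hsuf⟩
        intro y hy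
        rcases List.mem_cons.mp hy with rfl | hy
        · unfold pvK at *; omega
        · exact hpre y hy

theorem max_split (xs : List (Int × Int)) (m : Int × Int)
    (h : PySem.List.max? xs (fun t => t.1 + t.2) = some m) :
    ∃ pre suf, xs = pre ++ m :: suf
      ∧ (∀ y ∈ pre, pvK y < pvK m) ∧ (∀ y ∈ suf, pvK y ≤ pvK m) := by
  cases xs with
  | nil => simp [PySem.List.max?] at h
  | cons x t =>
    rw [max?_cons_eq_foldl] at h
    rcases maxFold_spec t x m (Option.some.inj h) with ⟨rfl, hall⟩ | ⟨pre, suf, ht, hlt, hpre, hsuf⟩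
    · exact ⟨[], t, rfl, by simp, hall⟩
    · refine ⟨x :: pre, suf, by simp [ht], ?_, hsuf⟩
      intro y hy
      rcases List.mem_cons.mp hy with rfl | hy
      · exact hlt
      · exact hpre y hy

-- abbreviation for the insertion step of PySem.List.sorted with key -(x+y)
def pvIns (x : Int × Int) (acc : List (Int × Int)) : List (Int × Int) :=
  PySem.List.insertBy (fun a b => decide (-(pvK a) < -(pvK b))) x acc

theorem sorted_eq_foldl_pvIns (xs : List (Int × Int)) :
    PySem.List.sorted xs (fun t => -(t.1 + t.2)) false
      = xs.foldl (fun acc x => pvIns x acc) [] := by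
  rfl

theorem pvIns_head (a : Int × Int) (S : List (Int × Int))
    (h : ∀ y ∈ S, -(pvK a) < -(pvK y)) : pvIns a S = a :: S := by
  cases S with
  | nil => rfl
  | cons s rest =>
    simp only [pvIns, PySem.List.insertBy]
    rw [if_pos (by simpa using h s (by simp))]

theorem pvIns_pass (x a : Int × Int) :
    ∀ (p acc : List (Int × Int)), (∀ y ∈ p, ¬ (-(pvK x) < -(pvK y))) → ¬ (-(pvK x) < -(pvK a)) →
    pvIns x (p ++ a :: acc) = p ++ a :: pvIns x acc := by
  intro p
  induction p with
  | nil =>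
    intro acc _ hxa
    simp only [List.nil_append, pvIns, PySem.List.insertBy]
    rw [if_neg (by simpa using hxa)]
  | cons q p' ih =>
    intro acc hp hxa
    simp only [List.cons_append, pvIns, PySem.List.insertBy]
    rw [if_neg (by simpa using hp q (by simp))]
    have := ih acc (fun y hy => hp y (by simp [hy])) hxa
    simpa [pvIns] using this

theorem foldl_pvIns_skip (a : Int × Int) :
    ∀ (t p acc : List (Int × Int)),
    (∀ y ∈ p, pvK a < pvK y) → (∀ x ∈ t, pvK x ≤ pvK a) →
    (t.foldl (fun acc x => pvIns x acc) (p ++ a :: acc))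
      = p ++ a :: t.foldl (fun acc x => pvIns x acc) acc := by
  intro t
  induction t with
  | nil => intro p acc _ _; rfl
  | cons x t' ih =>
    intro p acc hp ht
    simp only [List.foldl_cons]
    rw [pvIns_pass x a p acc
        (fun y hy => by have := hp y hy; have := ht x (by simp); omega)
        (by have := ht x (by simp); omega)]
    exact ih p (pvIns x acc) hp (fun z hz => ht z (by simp [hz]))

-- the crux: stable descending sort = first max, then stable sort of the rest
theorem sorted_cons_max (pool : List (Int × Int)) (m : Int × Int)
    (h : PySem.List.max? pool (fun t => t.1 + t.2) = some m) :
    PySem.List.sorted pool (fun t => -(t.1 + t.2)) false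
      = m :: PySem.List.sorted (pool.erase m) (fun t => -(t.1 + t.2)) false := by
  obtain ⟨pre, suf, rfl, hpre, hsuf⟩ := max_split pool m h
  have hm_pre : m ∉ pre := fun hm => absurd (hpre m hm) (lt_irrefl _)
  have herase : (pre ++ m :: suf).erase m = pre ++ suf := by
    rw [List.erase_append_right _ hm_pre, List.erase_cons_head]
  rw [herase, sorted_eq_foldl_pvIns, sorted_eq_foldl_pvIns]
  rw [List.foldl_append, List.foldl_cons, List.foldl_append]
  have hSpre : ∀ y ∈ pre.foldl (fun acc x => pvIns x acc) [], -(pvK m) < -(pvK y) := by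
    intro y hy
    have : y ∈ PySem.List.sorted pre (fun t => -(t.1 + t.2)) false := by
      rw [sorted_eq_foldl_pvIns]; exact hy
    have : y ∈ pre := (PySem.List.mem_sorted _ _ _ _).1 this
    have := hpre y this
    omega
  rw [pvIns_head m _ hSpre]
  exact foldl_pvIns_skip m suf [] _ (by simp) hsuf

-- proof-only: A's loop driven by repeated max extraction instead of the sorted list
def countLoopSel (pool : List (Int × Int)) (p w cnt : Int) : Int × Int :=
  match h : PySem.List.max? pool (fun t => t.1 + t.2) with
  | none => (w, cnt)
  | some m =>
    if p + m.2 ≥ w - m.1 then (w - m.1, cnt - 1)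
    else countLoopSel (pool.erase m) (p + m.2) (w - m.1) (cnt - 1)
  termination_by pool.length
  decreasing_by exact pvEraseLt (PySem.List.max?_mem h)

theorem countLoopSel_none (pool : List (Int × Int)) (p w cnt : Int)
    (hm : PySem.List.max? pool (fun t => t.1 + t.2) = none) :
    countLoopSel pool p w cnt = (w, cnt) := by
  rw [countLoopSel]
  split
  · rfl
  · rename_i m h; rw [hm] at h; cases h

theorem countLoopSel_some (pool : List (Int × Int)) (m : Int × Int) (p w cnt : Int)
    (hm : PySem.List.max? pool (fun t => t.1 + t.2) = some m) :
    countLoopSel pool p w cnt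
      = if p + m.2 ≥ w - m.1 then (w - m.1, cnt - 1)
        else countLoopSel (pool.erase m) (p + m.2) (w - m.1) (cnt - 1) := by
  rw [countLoopSel]
  split
  · rename_i h; rw [hm] at h; cases h
  · rename_i m' h
    rw [hm] at h
    cases Option.some.inj h
    rfl

theorem countLoopB_none (total : Int) (pool : List (Int × Int)) (got got_y picks : Int)
    (hm : PySem.List.max? pool (fun t => t.1 + t.2) = none) :
    countLoopB total pool got got_y picks = (picks, got_y) := by
  rw [countLoopB]
  split
  · rfl
  · rename_i m h; rw [hm] at h; cases h

theorem countLoopB_some (total : Int) (pool : List (Int × Int)) (m : Int × Int)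
    (got got_y picks : Int)
    (hm : PySem.List.max? pool (fun t => t.1 + t.2) = some m) :
    countLoopB total pool got got_y picks
      = if got + m.2 + m.1 ≥ total then (picks + 1, got_y + m.1)
        else countLoopB total (pool.erase m) (got + m.2 + m.1) (got_y + m.1) (picks + 1) := by
  rw [countLoopB]
  split
  · rename_i h; rw [hm] at h; cases h
  · rename_i m' h
    rw [hm] at h
    cases Option.some.inj h
    simp only [PySem.List.remove?_eq_some_erase pool m (PySem.List.max?_mem hm), Option.getD_some]

theorem loopV_sorted_eq_loopSel (pool : List (Int × Int)) :
    ∀ (p w cnt : Int),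
    countLoopV (PySem.List.sorted pool (fun t => -(t.1 + t.2)) false) p w cnt
      = countLoopSel pool p w cnt := by
  induction hl : pool.length using Nat.strong_induction_on generalizing pool with
  | _ L ih =>
    intro p w cnt
    match hm : PySem.List.max? pool (fun t => t.1 + t.2) with
    | none =>
      have : pool = [] := (PySem.List.max?_eq_none_iff _ _).mp hm
      subst this
      rw [countLoopSel_none _ _ _ _ hm]
      rfl
    | some m =>
      rw [countLoopSel_some _ m _ _ _ hm, sorted_cons_max pool m hm]
      simp only [countLoopV]
      by_cases hb : p + m.2 ≥ w - m.1
      · rw [if_pos hb, if_pos hb]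
      · rw [if_neg hb, if_neg hb]
        have hlt : (pool.erase m).length < L := by
          rw [← hl]; exact pvEraseLt (PySem.List.max?_mem hm)
        exact ih _ hlt (pool.erase m) rfl _ _ _

theorem loopB_eq_loopSel (total : Int) :
    ∀ (pool : List (Int × Int)) (got got_y picks cnt0 : Int),
    countLoopSel pool (got - got_y) (total - got_y) (cnt0 - picks)
      = (total - (countLoopB total pool got got_y picks).2,
         cnt0 - (countLoopB total pool got got_y picks).1) := by
  intro pool
  induction hl : pool.length using Nat.strong_induction_on generalizing pool with
  | _ L ih =>
    intro got got_y picks cnt0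
    match hm : PySem.List.max? pool (fun t => t.1 + t.2) with
    | none =>
      rw [countLoopSel_none _ _ _ _ hm, countLoopB_none _ _ _ _ _ hm]
    | some m =>
      rw [countLoopSel_some _ m _ _ _ hm, countLoopB_some _ _ m _ _ _ hm]
      by_cases hb : got + m.2 + m.1 ≥ total
      · rw [if_pos (show got - got_y + m.2 ≥ total - got_y - m.1 by omega), if_pos hb]
        simp only [Prod.mk.injEq]
        constructor <;> ring
      · rw [if_neg (show ¬ got - got_y + m.2 ≥ total - got_y - m.1 by omega), if_neg hb]
        have hlt : (pool.erase m).length < L := by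
          rw [← hl]; exact pvEraseLt (PySem.List.max?_mem hm)
        have := ih _ hlt (pool.erase m) rfl (got + m.2 + m.1) (got_y + m.1) (picks + 1) cnt0
        rw [show got - got_y + m.2 = got + m.2 + m.1 - (got_y + m.1) by ring,
            show total - got_y - m.1 = total - (got_y + m.1) by ring,
            show cnt0 - picks - 1 = cnt0 - (picks + 1) by ring]
        exact this

-- ===== VERDICT (by name: the statement is the Claim_ definition above) =====
theorem count_spec : Claim_equal_count := by
  intro n grid _hd hpre
  unfold Spec_count count count_alt
  simp only []
  rw [loopA_eq_loopV, key_eq grid]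
  rw [map_sorted (fun i => PySem.List.pyGetD grid i ((0:Int),(0:Int)))
        (fun t => -(t.1 + t.2)) (PySem.List.pyRange 0 n 1)]
  rw [map_pyRange_eq_pool grid n hpre]
  rw [loopV_sorted_eq_loopSel]
  have := loopB_eq_loopSel ((grid.map Prod.fst).sum)
      (if n > 0 then PySem.List.slice grid none (some n) else []) 0 0 0 n
  simp only [sub_zero] at this
  rw [this]
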